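-- pv_equiv track=rewrite | github.com/5un9hun/Pwn-Adeventure-3-Hack | KEYGEN/keygen.py | custom_base32_encode
-- ===== SOURCE A (Python) =====
-- def custom_base32_encode(dec):
--     dec_length = len(dec)
--     ret = [0 for _ in range(int(dec_length * (8 / 5)))]
--
--     bit_i = 0
--     for i in range(dec_length):
--         for j in range(bit_i, bit_i+8):
--             if(dec[i] & (1 << (j % 8))):
--                 ret[j // 5] |= 1 << (j % 5)
--         bit_i += 8
--
--     return ret
-- ===== SOURCE B (Python) =====
-- def custom_base32_encode(dec):
--     # Gather form: pack the low 8 bits of each element into one little-endian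
--     # integer, then read out consecutive 5-bit groups.
--     n = int.from_bytes(bytes(d & 0xff for d in dec), 'little')
--     return [(n >> (5 * m)) & 31 for m in range(len(dec) * 8 // 5)]
-- ===== Notes on version B (the rewrite author's own statement) =====
-- stated objective: simpler
-- what changed: Replaces the per-input-bit scatter (nested loops OR-ing single bits into a mutable output list) with a gather: pack all low bytes into one little-endian integer and read each output element as a 5-bit group of it; Pre_ excludes exactly the inputs where A raises IndexError (a set bit among the top 8*len(dec) mod 5 bits of the last element's low byte), where B returns the truncated list.
import Mathlib
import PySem

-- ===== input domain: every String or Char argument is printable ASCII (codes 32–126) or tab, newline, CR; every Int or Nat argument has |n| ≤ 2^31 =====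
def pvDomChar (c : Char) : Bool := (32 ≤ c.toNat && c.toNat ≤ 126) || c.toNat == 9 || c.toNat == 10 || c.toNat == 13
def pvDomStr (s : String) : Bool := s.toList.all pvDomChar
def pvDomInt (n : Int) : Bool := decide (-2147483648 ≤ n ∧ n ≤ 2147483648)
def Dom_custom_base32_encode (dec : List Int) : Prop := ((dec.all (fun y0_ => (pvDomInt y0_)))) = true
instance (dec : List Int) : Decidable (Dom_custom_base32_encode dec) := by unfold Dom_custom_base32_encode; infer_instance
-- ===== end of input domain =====

-- B replaces A's per-bit scatter into a mutable list by a gather: pack the low bytes into one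
-- little-endian integer and read each output element as a 5-bit group (objective: simpler).


-- ===== PORT A =====
-- int(dec_length * (8/5)) equals ⌊8*dec_length/5⌋ exactly: 8/5 is the double 1.6000000000000000888…,
-- whose product with any feasible length has error far below 1, and int() truncates.
-- All loop indices are nonnegative, so Python's j % 8, j // 5, j % 5 are Nat % and /.
-- The fold state is the pair (ret, bit_i), exactly A's mutable state; j stands for bit_i + k.
def custom_base32_encode (dec : List Int) : List Int :=
  let dec_length := dec.length
  let ret : List Int := List.replicate (8 * dec_length / 5) 0
  ((List.range dec_length).foldl (fun (s : List Int × Nat) (i : Nat) =>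
      ((List.range 8).foldl (fun (ret : List Int) (k : Nat) =>
          if PySem.Int.band (PySem.List.pyGetD dec (i : Int) 0) ((1 : Int) <<< ((s.2 + k) % 8)) ≠ 0 then
            PySem.List.pySetD ret (((s.2 + k) / 5 : Nat) : Int)
              (PySem.Int.bor (PySem.List.pyGetD ret (((s.2 + k) / 5 : Nat) : Int) 0)
                ((1 : Int) <<< ((s.2 + k) % 5)))
          else ret) s.1, s.2 + 8))
    (ret, 0)).1

-- ===== PORT B =====
-- int.from_bytes(bytes(d & 0xff for d in dec), 'little') is the little-endian byte fold below.
def custom_base32_encode_alt (dec : List Int) : List Int :=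
  let n : Int := (dec.map (fun d => PySem.Int.band d 255)).foldr (fun b acc => b + 256 * acc) 0
  (List.range (dec.length * 8 / 5)).map (fun (m : Nat) => PySem.Int.band (n >>> (5 * m)) 31)

-- ===== PRECONDITION & SPEC =====
-- Pre_ excludes exactly the inputs on which A raises IndexError: when 8*len(dec) is not a
-- multiple of 5 and one of the top (8*len(dec) mod 5) bits of the last element's low byte is
-- set, A scatters that bit past the end of its truncated output list.
def Pre_custom_base32_encode (dec : List Int) : Prop :=
  PySem.Int.band (dec.getLast?.getD 0) 255 >>> (8 - 8 * dec.length % 5) = 0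
instance (dec : List Int) : Decidable (Pre_custom_base32_encode dec) := by
  unfold Pre_custom_base32_encode; infer_instance

def pvWitness_custom_base32_encode : List Int := [1, 2, 3, 4, 5]

def Spec_custom_base32_encode (dec : List Int) (out : List Int) : Prop := out = custom_base32_encode_alt dec
instance (dec : List Int) (out : List Int) : Decidable (Spec_custom_base32_encode dec out) := by unfold Spec_custom_base32_encode; infer_instance

-- ===== CLAIM (what is proved, stated in full; the proofs are below) =====
def Claim_equal_custom_base32_encode : Prop := ∀ (dec : List Int), Dom_custom_base32_encode dec → Pre_custom_base32_encode dec → Spec_custom_base32_encode dec (custom_base32_encode dec)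


-- ===== LEMMAS AND PROOFS =====

-- the low byte of an element, as a natural number
def pvByte (d : Int) : Nat := (PySem.Int.band d 255).toNat
-- little-endian value of a byte list
def pvLE : List Nat → Nat
  | [] => 0
  | b :: bs => b + 256 * pvLE bs
def pvN (dec : List Int) : Nat := pvLE (dec.map pvByte)
-- the effect of one bit j of A's scatter loop
def pvStep (n : Nat) (ret : List Int) (j : Nat) : List Int :=
  if n.testBit j then
    PySem.List.pySetD ret ((j / 5 : Nat) : Int)
      (PySem.Int.bor (PySem.List.pyGetD ret ((j / 5 : Nat) : Int) 0) ((1 : Int) <<< (j % 5)))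
  else ret

lemma pv_band255 (d : Int) : PySem.Int.band d 255 = ((pvByte d : Nat) : Int) := by
  unfold pvByte
  rw [Int.toNat_of_nonneg]
  rw [PySem.Int.band_comm]
  exact PySem.Int.band_nonneg_of_nonneg_left d (by norm_num)

lemma pvByte_lt (d : Int) : pvByte d < 256 := by
  have h1 : d.toNat &&& 255 ≤ 255 := Nat.and_le_right
  unfold pvByte PySem.Int.band
  split_ifs with ha hb <;> simp_all <;> omega

lemma pv_shl (k : Nat) : ((1 : Int) <<< k) = ((2 ^ k : Nat) : Int) := by
  rw [Int.shiftLeft_eq]; push_cast; ring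

set_option maxRecDepth 100000 in
lemma pv_compl : ∀ x < 256, ∀ k < 8, (255 - x).testBit k = !(x.testBit k) := by decide

lemma pv_testBit_div (n J : Nat) : n.testBit J = decide (n / 2 ^ J % 2 = 1) := by
  rcases Nat.mod_two_eq_zero_or_one (n / 2 ^ J) with h | h <;>
    simp [Nat.testBit, Nat.shiftRight_eq_div_pow, Nat.one_and_eq_mod_two, h]

lemma pv_bandBit (d : Int) (k : Nat) (hk : k < 8) :
    (PySem.Int.band d ((1 : Int) <<< k) ≠ 0) ↔ (pvByte d).testBit k = true := by
  rw [pv_shl]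
  by_cases hd : 0 ≤ d
  · have h1 : PySem.Int.band d ((2 ^ k : Nat) : Int) = ((d.toNat &&& 2 ^ k : Nat) : Int) := by
      unfold PySem.Int.band
      rw [if_pos hd, if_pos (by positivity)]
      rw [Int.toNat_natCast]
    have hb : pvByte d = d.toNat &&& 255 := by
      unfold pvByte PySem.Int.band
      rw [if_pos hd, if_pos (by norm_num)]
      simp only [Int.toNat_natCast]
      rw [show Int.toNat 255 = 255 from rfl]
    rw [h1, hb]
    have h255 : (255 : Nat) = 2 ^ 8 - 1 := by norm_num
    rw [Nat.testBit_and, h255, Nat.testBit_two_pow_sub_one]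
    simp only [hk, decide_true, Bool.and_true]
    rw [Nat.and_two_pow]
    cases hbit : d.toNat.testBit k
    · simp
    · simp
  · set m := (-d - 1).toNat with hm
    have h1 : PySem.Int.band d ((2 ^ k : Nat) : Int) = ((2 ^ k - (2 ^ k &&& m) : Nat) : Int) := by
      unfold PySem.Int.band
      rw [if_neg hd, if_pos (by positivity)]
      rw [Int.toNat_natCast, ← hm]
    have hb : pvByte d = 255 - (255 &&& m) := by
      unfold pvByte PySem.Int.band
      rw [if_neg hd, if_pos (by norm_num)]
      simp only [Int.toNat_natCast, ← hm]
      rw [show Int.toNat 255 = 255 from rfl]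
    have h2 : 255 &&& m = m % 2 ^ 8 := by
      rw [Nat.and_comm, show (255 : Nat) = 2 ^ 8 - 1 by norm_num]
      exact Nat.and_two_pow_sub_one_eq_mod m 8
    have h3 : 2 ^ k &&& m = (m.testBit k).toNat * 2 ^ k := by
      rw [Nat.and_comm, Nat.and_two_pow]
    have h5 : (m % 2 ^ 8).testBit k = m.testBit k := by
      rw [Nat.testBit_mod_two_pow]
      simp [hk]
    have h6 : m % 2 ^ 8 < 256 := by
      have := Nat.mod_lt m (show 0 < 2 ^ 8 by norm_num)
      simpa using this
    rw [h1, hb, h2, pv_compl (m % 2 ^ 8) h6 k hk, h5, h3]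
    cases hbit : m.testBit k
    · simp
    · simp

lemma pvLE_testBit (bs : List Nat) (h : ∀ b ∈ bs, b < 256) (j : Nat) :
    (pvLE bs).testBit j = (bs.getD (j / 8) 0).testBit (j % 8) := by
  induction bs generalizing j with
  | nil => simp [pvLE, Nat.zero_testBit, List.getD]
  | cons b bs ih =>
    have hb : b < 256 := h b (by simp)
    have hbs : ∀ x ∈ bs, x < 256 := fun x hx => h x (by simp [hx])
    have he : pvLE (b :: bs) = 2 ^ 8 * pvLE bs + b := by simp [pvLE]; ring
    rw [he, Nat.testBit_two_pow_mul_add _ hb]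
    by_cases hj : j < 8
    · have h0 : j / 8 = 0 := by omega
      have h1 : j % 8 = j := by omega
      simp [hj, h0, h1]
    · rw [if_neg hj, ih hbs (j - 8)]
      have h8 : j / 8 = (j - 8) / 8 + 1 := by omega
      have h9 : (j - 8) % 8 = j % 8 := by omega
      rw [h8, List.getD_cons_succ, h9]

lemma pvLE_lt (bs : List Nat) (h : ∀ b ∈ bs, b < 256) : pvLE bs < 2 ^ (8 * bs.length) := by
  induction bs with
  | nil => simp [pvLE]
  | cons b bs ih =>
    have hb : b < 256 := h b (by simp)
    have ihh := ih (fun x hx => h x (by simp [hx]))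
    have hlen : 8 * (b :: bs).length = 8 + 8 * bs.length := by simp; ring
    rw [hlen, pow_add]
    have : (2 : Nat) ^ 8 = 256 := by norm_num
    rw [this]
    calc pvLE (b :: bs) = b + 256 * pvLE bs := rfl
      _ < 256 * (pvLE bs + 1) := by omega
      _ ≤ 256 * 2 ^ (8 * bs.length) := Nat.mul_le_mul_left _ (by omega)

lemma pv_or_small : ∀ x < 32, ∀ k < 5, x < 2 ^ k → x ||| 2 ^ k = x + 2 ^ k := by decide

lemma pvStep_inv (n L J : Nat) (ret : List Int)
    (hlen : ret.length = L)
    (hinv : ∀ m, m < L → ret[m]? = some ((((n % 2 ^ J) >>> (5 * m)) % 32 : Nat) : Int))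
    (hJ : n.testBit J = true → J / 5 < L) :
    (pvStep n ret J).length = L ∧
      ∀ m, m < L → (pvStep n ret J)[m]? = some ((((n % 2 ^ (J + 1)) >>> (5 * m)) % 32 : Nat) : Int) := by
  have hsplit : n % 2 ^ (J + 1) = n % 2 ^ J + 2 ^ J * (n / 2 ^ J % 2) := Nat.mod_pow_succ
  have htb : n.testBit J = decide (n / 2 ^ J % 2 = 1) := pv_testBit_div n J
  have halt : n % 2 ^ J < 2 ^ J := Nat.mod_lt _ (Nat.two_pow_pos J)
  unfold pvStep
  by_cases hbit : n.testBit J = true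
  · have h1 : n / 2 ^ J % 2 = 1 := by rw [htb] at hbit; simpa using hbit
    have hm0 : J / 5 < L := hJ hbit
    have hk5 : J % 5 < 5 := Nat.mod_lt J (by norm_num)
    have hpow : (2 : Nat) ^ J = 2 ^ (5 * (J / 5)) * 2 ^ (J % 5) := by
      rw [← pow_add]; congr 1; omega
    have hk16 : (2 : Nat) ^ (J % 5) ≤ 16 := by
      calc (2 : Nat) ^ (J % 5) ≤ 2 ^ 4 := Nat.pow_le_pow_right (by norm_num) (by omega)
        _ = 16 := by norm_num
    set A := n % 2 ^ J with hA
    have hxlt : A / 2 ^ (5 * (J / 5)) < 2 ^ (J % 5) := by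
      rw [Nat.div_lt_iff_lt_mul (Nat.two_pow_pos _)]
      calc A < 2 ^ J := halt
        _ = 2 ^ (J % 5) * 2 ^ (5 * (J / 5)) := by rw [← pow_add]; congr 1; omega
    have hx32 : A / 2 ^ (5 * (J / 5)) % 32 = A / 2 ^ (5 * (J / 5)) :=
      Nat.mod_eq_of_lt (by omega)
    rw [if_pos hbit, PySem.List.pySetD_natCast, PySem.List.pyGetD_natCast]
    refine ⟨by rw [List.length_set]; exact hlen, ?_⟩
    intro m hm
    by_cases hmm : m = J / 5
    · subst hmm
      rw [List.getElem?_set_self (by omega), List.getD_eq_getElem?_getD, hinv _ hm0]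
      simp only [Option.getD_some]
      have hdiv : (A + 2 ^ J) / 2 ^ (5 * (J / 5)) = A / 2 ^ (5 * (J / 5)) + 2 ^ (J % 5) := by
        rw [hpow]
        exact Nat.add_mul_div_left _ _ (Nat.two_pow_pos _)
      have hfin : A / 2 ^ (5 * (J / 5)) + 2 ^ (J % 5) < 32 := by omega
      have hgoal : A >>> (5 * (J / 5)) % 32 ||| 2 ^ (J % 5)
          = (n % 2 ^ (J + 1)) >>> (5 * (J / 5)) % 32 := by
        rw [Nat.shiftRight_eq_div_pow, Nat.shiftRight_eq_div_pow, hsplit, h1, mul_one, hdiv,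
          hx32, pv_or_small _ (by omega) _ hk5 hxlt]
        exact (Nat.mod_eq_of_lt hfin).symm
      rw [pv_shl, PySem.Int.bor_natCast, hgoal]
    · rw [List.getElem?_set_ne (fun hh => hmm hh.symm), hinv m hm]
      congr 2
      rw [Nat.shiftRight_eq_div_pow, Nat.shiftRight_eq_div_pow, hsplit, h1, mul_one]
      rcases (by omega : 5 * m + 5 ≤ J ∨ J < 5 * m) with hc | hc
      · have hp2 : (2 : Nat) ^ J = 2 ^ (5 * m) * (32 * 2 ^ (J - 5 * m - 5)) := by
          rw [show (32 : Nat) = 2 ^ 5 by norm_num, ← pow_add, ← pow_add]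
          congr 1; omega
        rw [hp2, Nat.add_mul_div_left _ _ (Nat.two_pow_pos _), Nat.add_mul_mod_self_left]
      · have hle : (2 : Nat) ^ (J + 1) ≤ 2 ^ (5 * m) := Nat.pow_le_pow_right (by norm_num) (by omega)
        have h2J : (2 : Nat) ^ (J + 1) = 2 * 2 ^ J := by ring
        rw [Nat.div_eq_of_lt (show A < 2 ^ (5 * m) by omega),
          Nat.div_eq_of_lt (show A + 2 ^ J < 2 ^ (5 * m) by omega)]
  · have h0 : n / 2 ^ J % 2 = 0 := by
      rw [htb] at hbit
      simp only [decide_eq_true_eq] at hbit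
      omega
    rw [if_neg hbit]
    refine ⟨hlen, ?_⟩
    intro m hm
    rw [hinv m hm, hsplit, h0, Nat.mul_zero, Nat.add_zero]

lemma pvFold_inv (n L T : Nat) (hL : ∀ J, n.testBit J = true → J / 5 < L) :
    ((List.range T).foldl (pvStep n) (List.replicate L (0 : Int))).length = L ∧
      ∀ m, m < L → ((List.range T).foldl (pvStep n) (List.replicate L (0 : Int)))[m]? =
        some ((((n % 2 ^ T) >>> (5 * m)) % 32 : Nat) : Int) := by
  induction T with
  | zero =>
    refine ⟨by simp, ?_⟩
    intro m hm
    simp [hm, Nat.mod_one]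
  | succ T ih =>
    rw [List.range_succ, List.foldl_append, List.foldl_cons, List.foldl_nil]
    exact pvStep_inv n L T _ ih.1 ih.2 (hL T)

lemma pvA_eq_fold (dec : List Int) :
    custom_base32_encode dec =
      (List.range (8 * dec.length)).foldl (pvStep (pvN dec))
        (List.replicate (8 * dec.length / 5) 0) := by
  have hbytes : ∀ b ∈ dec.map pvByte, b < 256 := by
    intro b hb
    obtain ⟨d, _, rfl⟩ := List.mem_map.mp hb
    exact pvByte_lt d
  have key : ∀ M, M ≤ dec.length → ∀ r : List Int,
      (List.range M).foldl (fun (s : List Int × Nat) (i : Nat) =>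
        ((List.range 8).foldl (fun (ret : List Int) (k : Nat) =>
            if PySem.Int.band (PySem.List.pyGetD dec (i : Int) 0) ((1 : Int) <<< ((s.2 + k) % 8)) ≠ 0 then
              PySem.List.pySetD ret (((s.2 + k) / 5 : Nat) : Int)
                (PySem.Int.bor (PySem.List.pyGetD ret (((s.2 + k) / 5 : Nat) : Int) 0)
                  ((1 : Int) <<< ((s.2 + k) % 5)))
            else ret) s.1, s.2 + 8)) (r, 0)
      = ((List.range (8 * M)).foldl (pvStep (pvN dec)) r, 8 * M) := by
    intro M
    induction M with
    | zero => intro _ r; simp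
    | succ M ih =>
      intro hM r
      rw [List.range_succ (n := M), List.foldl_append, ih (by omega) r, List.foldl_cons,
        List.foldl_nil]
      dsimp only
      have h2 : 8 * (M + 1) = 8 * M + 8 := by omega
      rw [h2, List.range_add, List.foldl_append, List.foldl_map]
      refine Prod.ext ?_ rfl
      dsimp only
      apply PySem.List.foldl_congr_mem
      intro ret k hk
      have hk8 : k < 8 := List.mem_range.mp hk
      have hmod8 : (8 * M + k) % 8 = k := by omega
      rw [hmod8]
      unfold pvStep
      rw [PySem.List.pyGetD_natCast dec M 0]
      have hget : (dec.map pvByte).getD ((8 * M + k) / 8) 0 = pvByte (dec.getD M 0) := by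
        have hq : (8 * M + k) / 8 = M := by omega
        rw [hq, List.getD_eq_getElem?_getD, List.getElem?_map, List.getD_eq_getElem?_getD,
          List.getElem?_eq_getElem (by omega : M < dec.length)]
        rfl
      have hcond : (PySem.Int.band (dec.getD M 0) ((1 : Int) <<< k) ≠ 0) ↔
          ((pvN dec).testBit (8 * M + k) = true) := by
        rw [pv_bandBit _ k hk8]
        unfold pvN
        rw [pvLE_testBit _ hbytes, hmod8, hget]
      exact if_congr hcond rfl rfl
  simp only [custom_base32_encode]
  rw [key dec.length le_rfl]

lemma pvB_eq (dec : List Int) :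
    custom_base32_encode_alt dec =
      (List.range (dec.length * 8 / 5)).map
        (fun m => ((((pvN dec) >>> (5 * m)) % 32 : Nat) : Int)) := by
  have hfold : (dec.map (fun d => PySem.Int.band d 255)).foldr (fun b acc => b + 256 * acc) 0
      = ((pvN dec : Nat) : Int) := by
    unfold pvN
    induction dec with
    | nil => simp [pvLE]
    | cons d ds ih =>
      have hc : pvLE (List.map pvByte (d :: ds)) = pvByte d + 256 * pvLE (List.map pvByte ds) := by
        simp [pvLE]
      rw [List.map_cons, List.foldr_cons, ih, pv_band255, hc]
      push_cast
      ring
  simp only [custom_base32_encode_alt]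
  rw [hfold]
  apply List.map_congr_left
  intro m _
  rw [← Int.natCast_shiftRight, show ((31 : Int)) = ((31 : Nat) : Int) by norm_num,
    PySem.Int.band_natCast]
  have h31 : pvN dec >>> (5 * m) &&& 31 = pvN dec >>> (5 * m) % 32 := by
    have := Nat.and_two_pow_sub_one_eq_mod (pvN dec >>> (5 * m)) 5
    norm_num at this
    exact this
  rw [h31]

lemma pv_pre_bits (dec : List Int) (hpre : Pre_custom_base32_encode dec) :
    ∀ J, (pvN dec).testBit J = true → J / 5 < 8 * dec.length / 5 := by
  have hbytes : ∀ b ∈ dec.map pvByte, b < 256 := by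
    intro b hb
    obtain ⟨d, _, rfl⟩ := List.mem_map.mp hb
    exact pvByte_lt d
  intro J htb
  by_cases hJN : J < 8 * dec.length
  · by_cases hJL : J < 5 * (8 * dec.length / 5)
    · omega
    · exfalso
      have hN : 1 ≤ dec.length := by omega
      unfold pvN at htb
      rw [pvLE_testBit _ hbytes J] at htb
      have hJ8 : J / 8 = dec.length - 1 := by omega
      have hne : dec ≠ [] := by
        intro h; rw [h] at hN; simp at hN
      have hlast : dec.getLast?.getD 0 = dec.getD (dec.length - 1) 0 := by
        rw [List.getLast?_eq_getElem?, List.getD_eq_getElem?_getD]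
      have hget : (dec.map pvByte).getD (dec.length - 1) 0 = pvByte (dec.getD (dec.length - 1) 0) := by
        rw [List.getD_eq_getElem?_getD, List.getElem?_map, List.getD_eq_getElem?_getD,
          List.getElem?_eq_getElem (by omega : dec.length - 1 < dec.length)]
        rfl
      unfold Pre_custom_base32_encode at hpre
      rw [pv_band255, ← Int.natCast_shiftRight] at hpre
      have hnat : pvByte (dec.getLast?.getD 0) >>> (8 - 8 * dec.length % 5) = 0 := by
        exact_mod_cast hpre
      rw [Nat.shiftRight_eq_div_pow] at hnat
      have hlt : pvByte (dec.getLast?.getD 0) < 2 ^ (8 - 8 * dec.length % 5) := by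
        have h := Nat.div_eq_zero_iff.mp hnat
        have h2 := Nat.two_pow_pos (8 - 8 * dec.length % 5)
        omega
      have hle : (2 : Nat) ^ (8 - 8 * dec.length % 5) ≤ 2 ^ (J % 8) :=
        Nat.pow_le_pow_right (by norm_num) (by omega)
      have hfalse : (pvByte (dec.getLast?.getD 0)).testBit (J % 8) = false :=
        Nat.testBit_lt_two_pow (by omega)
      rw [hJ8, hget, ← hlast, hfalse] at htb
      exact Bool.false_ne_true htb
  · exfalso
    have hnlt : pvN dec < 2 ^ (8 * dec.length) := by
      have := pvLE_lt (dec.map pvByte) hbytes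
      simpa [pvN] using this
    have : (pvN dec).testBit J = false :=
      Nat.testBit_lt_two_pow (lt_of_lt_of_le hnlt (Nat.pow_le_pow_right (by norm_num) (by omega)))
    rw [this] at htb
    exact Bool.false_ne_true htb

-- ===== VERDICT (by name: the statement is the Claim_ definition above) =====
theorem custom_base32_encode_spec : Claim_equal_custom_base32_encode := by
  intro dec _hdom hpre
  unfold Spec_custom_base32_encode
  obtain ⟨hlen, helts⟩ := pvFold_inv (pvN dec) (8 * dec.length / 5) (8 * dec.length)
    (pv_pre_bits dec hpre)
  rw [pvA_eq_fold, pvB_eq]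
  have hnlt : pvN dec < 2 ^ (8 * dec.length) := by
    have := pvLE_lt (dec.map pvByte)
      (by intro b hb; obtain ⟨d, _, rfl⟩ := List.mem_map.mp hb; exact pvByte_lt d)
    simpa [pvN] using this
  have hmod : pvN dec % 2 ^ (8 * dec.length) = pvN dec := Nat.mod_eq_of_lt hnlt
  apply List.ext_getElem?
  intro m
  by_cases hm : m < 8 * dec.length / 5
  · rw [helts m hm, hmod]
    rw [List.getElem?_map, List.getElem?_range (by omega : m < dec.length * 8 / 5)]
    rfl
  · have h1 : ((List.range (8 * dec.length)).foldl (pvStep (pvN dec))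
        (List.replicate (8 * dec.length / 5) 0))[m]? = none := by
      rw [List.getElem?_eq_none]; omega
    have h2 : ((List.range (dec.length * 8 / 5)).map
        (fun m => ((((pvN dec) >>> (5 * m)) % 32 : Nat) : Int)))[m]? = none := by
      rw [List.getElem?_eq_none]; simp; omega
    rw [h1, h2]
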